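-- pv_equiv track=rewrite | github.com/heliosssssssssss/helios-lc-25-27 | aipo/aipo-main/aipo-2025-prelim/shipyard.py | count_transport_ways
-- ===== SOURCE A (Python) =====
-- MODULO = 20242024
--
-- def count_transport_ways(n, m):
--     # Edge case: No containers or invalid input
--     if n <= 0 or m <= 0:
--         return 0
--
--     # Edge case: Lorry can carry all containers in one trip
--     if m >= n:
--         return 1
--
--     # Edge case: Only one container per trip
--     if m == 1:
--         return 1
--
--     # Dynamic programming with a circular buffer
--     dp = [0] * (m + 1)  # Use a circular buffer to save space
--     dp[0] = 1  # Base case: 1 way to transport 0 containers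
--     running_sum = 1  # Sliding window sum
--
--     for i in range(1, n + 1):
--         dp_index = i % (m + 1)
--         if i > m:
--             running_sum = (running_sum - dp[(i - m - 1) % (m + 1)] + MODULO) % MODULO
--         dp[dp_index] = running_sum
--         running_sum = (running_sum + dp[dp_index]) % MODULO
--
--     return dp[n % (m + 1)]
-- ===== SOURCE B (Python) =====
-- MODULO = 20242024
--
-- def count_transport_ways(n, m):
--     # Edge case: No containers or invalid input
--     if n <= 0 or m <= 0:
--         return 0
--     # Edge case: Lorry can carry all containers in one trip
--     if m >= n:
--         return 1
--     # Edge case: Only one container per trip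
--     if m == 1:
--         return 1
--     # Full DP table; each entry re-scans the window of the last up-to-m entries
--     dp = [1]
--     for i in range(1, n + 1):
--         dp.append(sum(dp[max(0, i - m):i]) % MODULO)
--     return dp[n]
-- ===== Notes on version B (the rewrite author's own statement) =====
-- stated objective: simpler
-- what changed: Replaced the circular-buffer + maintained sliding running sum by a plain full DP table where each entry re-scans (re-sums) the window of the previous up-to-m entries.
import Mathlib
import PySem

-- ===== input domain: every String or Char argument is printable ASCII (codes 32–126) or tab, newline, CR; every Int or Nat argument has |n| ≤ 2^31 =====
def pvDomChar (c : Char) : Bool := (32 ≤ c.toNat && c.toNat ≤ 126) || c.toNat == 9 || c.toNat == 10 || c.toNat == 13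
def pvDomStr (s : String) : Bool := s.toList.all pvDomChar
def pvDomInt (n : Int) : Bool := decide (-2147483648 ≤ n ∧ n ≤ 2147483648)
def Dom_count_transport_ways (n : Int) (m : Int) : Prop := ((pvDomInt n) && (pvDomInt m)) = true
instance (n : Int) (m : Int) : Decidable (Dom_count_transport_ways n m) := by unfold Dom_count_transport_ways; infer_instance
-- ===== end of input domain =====

-- B replaces A's circular buffer + maintained sliding running sum by a plain full DP
-- table where each entry re-sums the window of the previous up-to-m entries (simpler).

-- ===== PORT A =====
-- One step of A's loop body: state = (circular buffer dp, running_sum).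
-- All buffer indices are i % (m+1) with m+1 > 0, hence nonnegative and < m+1:
-- Python's dp[idx] never raises here, so getD/set with .toNat is exact.
def ctwStepA (m : Int) (st : List Int × Int) (i : Int) : List Int × Int :=
  let dp := st.1
  let rs := st.2
  let rs :=
    if i > m then
      PySem.Int.mod (rs - dp.getD ((PySem.Int.mod (i - m - 1) (m + 1)).toNat) 0 + 20242024) 20242024
    else rs
  let dp := dp.set ((PySem.Int.mod i (m + 1)).toNat) rs
  (dp, PySem.Int.mod (rs + dp.getD ((PySem.Int.mod i (m + 1)).toNat) 0) 20242024)

def count_transport_ways (n : Int) (m : Int) : Int :=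
  if n ≤ 0 ∨ m ≤ 0 then 0
  else if m ≥ n then 1
  else if m = 1 then 1
  else
    let dp0 := (List.replicate (m + 1).toNat 0).set 0 1
    let st := (PySem.List.pyRange 1 (n + 1) 1).foldl (ctwStepA m) (dp0, 1)
    st.1.getD ((PySem.Int.mod n (m + 1)).toNat) 0

-- ===== PORT B =====
-- One step of B's loop body: append the re-scanned window sum (mod 20242024).
def ctwStepB (m : Int) (dp : List Int) (i : Int) : List Int :=
  dp ++ [PySem.Int.mod (PySem.List.slice dp (some (max 0 (i - m))) (some i)).sum 20242024]

def count_transport_ways_alt (n : Int) (m : Int) : Int :=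
  if n ≤ 0 ∨ m ≤ 0 then 0
  else if m ≥ n then 1
  else if m = 1 then 1
  else
    let dp := (PySem.List.pyRange 1 (n + 1) 1).foldl (ctwStepB m) [1]
    -- n ≥ 1 here, so dp[n] is a plain nonnegative in-range index
    dp.getD n.toNat 0

-- ===== PRECONDITION & SPEC =====
def Spec_count_transport_ways (n : Int) (m : Int) (out : Int) : Prop := out = count_transport_ways_alt n m
instance (n : Int) (m : Int) (out : Int) : Decidable (Spec_count_transport_ways n m out) := by unfold Spec_count_transport_ways; infer_instance

-- ===== CLAIM (what is proved, stated in full; the proofs are below) =====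
def Claim_equal_count_transport_ways : Prop := ∀ (n : Int) (m : Int), Dom_count_transport_ways n m → Spec_count_transport_ways n m (count_transport_ways n m)

-- ===== LEMMAS AND PROOFS =====

def ctwB (m : Int) (k : Nat) : List Int :=
  (PySem.List.pyRange 1 ((k:Int)+1) 1).foldl (ctwStepB m) [1]

def ctwA (m : Int) (k : Nat) : List Int × Int :=
  (PySem.List.pyRange 1 ((k:Int)+1) 1).foldl (ctwStepA m)
    ((List.replicate (m+1).toNat 0).set 0 1, 1)

lemma ctwB_zero (m : Int) : ctwB m 0 = [1] := by
  simp [ctwB]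

lemma ctwA_zero (m : Int) : ctwA m 0 = ((List.replicate (m+1).toNat 0).set 0 1, 1) := by
  simp [ctwA]

lemma ctwB_succ (m : Int) (k : Nat) : ctwB m (k+1) = ctwStepB m (ctwB m k) ((k:Int)+1) := by
  unfold ctwB
  rw [show (((k+1:Nat)):Int)+1 = ((k:Int)+1)+1 by push_cast; ring,
    PySem.List.pyRange_one_succ_right (by omega), List.foldl_append]
  simp

lemma ctwA_succ (m : Int) (k : Nat) : ctwA m (k+1) = ctwStepA m (ctwA m k) ((k:Int)+1) := by
  unfold ctwA
  rw [show (((k+1:Nat)):Int)+1 = ((k:Int)+1)+1 by push_cast; ring,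
    PySem.List.pyRange_one_succ_right (by omega), List.foldl_append]
  simp

lemma ctwB_length (m : Int) (k : Nat) : (ctwB m k).length = k+1 := by
  induction k with
  | zero => simp [ctwB_zero]
  | succ k ih => rw [ctwB_succ]; simp [ctwStepB, ih]

lemma ctw_inv (m : Int) (hm : 2 ≤ m) (k : Nat) :
    (ctwA m k).1.length = m.toNat + 1
  ∧ (ctwA m k).2 = PySem.Int.mod (((ctwB m k).drop (k - m.toNat)).sum) 20242024
  ∧ ∀ j : Nat, k - m.toNat ≤ j → j ≤ k →
      (ctwA m k).1.getD (j % (m.toNat+1)) 0 = (ctwB m k).getD j 0 := by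
  induction k with
  | zero =>
    rw [ctwA_zero, ctwB_zero]
    refine ⟨by simp; omega, ?_, ?_⟩
    · show (1:Int) = PySem.Int.mod (List.drop (0 - m.toNat) [1]).sum 20242024
      rw [Nat.zero_sub, List.drop_zero]
      decide
    intro j _ hj
    interval_cases j
    rw [Nat.zero_mod]
    rw [List.getD_eq_getElem _ _ (by simp; omega)]
    simp
  | succ k ih =>
    obtain ⟨hlen, hrs, hbuf⟩ := ih
    set mN := m.toNat with hmN
    have hm1 : m + 1 = ((mN+1 : Nat) : Int) := by omega
    -- index of the write: (k+1) % (mN+1)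
    have hidx : (PySem.Int.mod ((k:Int)+1) (m+1)).toNat = (k+1) % (mN+1) := by
      rw [PySem.Int.mod_eq_emod_of_pos (by omega),
        show ((k:Int)+1) = ((k+1:Nat):Int) by push_cast; ring, hm1]
      rw [← Int.natCast_emod]
      exact Int.toNat_natCast _
    -- the slice B re-scans is exactly drop (k+1-mN) of the old table
    have hmax : max 0 ((k:Int)+1-m) = ((k+1-mN : Nat) : Int) := by omega
    have hslice : PySem.List.slice (ctwB m k) (some (max 0 ((k:Int)+1-m))) (some ((k:Int)+1))
        = (ctwB m k).drop (k+1-mN) := by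
      have h0a : (0:Int) ≤ ((k+1-mN : Nat) : Int) := by positivity
      have h0b : (0:Int) ≤ (k:Int)+1 := by positivity
      rw [hmax, PySem.List.slice_toNat _ h0a h0b]
      rw [Int.toNat_natCast, show ((k:Int)+1).toNat = k+1 by omega]
      apply List.take_of_length_le
      rw [List.length_drop, ctwB_length]
    set t : Int := ((ctwB m k).drop (k+1-mN)).sum with ht
    -- the value B appends
    have hvB : ctwB m (k+1) = ctwB m k ++ [PySem.Int.mod t 20242024] := by
      rw [ctwB_succ]; unfold ctwStepB; rw [hslice]
    -- A's running sum after the conditional subtraction equals mod t M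
    have hrs_mid :
        (if ((k:Int)+1) > m then
          PySem.Int.mod ((ctwA m k).2 -
            (ctwA m k).1.getD ((PySem.Int.mod (((k:Int)+1) - m - 1) (m+1)).toNat) 0 + 20242024) 20242024
        else (ctwA m k).2) = PySem.Int.mod t 20242024 := by
      by_cases hk : mN ≤ k
      · rw [if_pos (by omega)]
        have hsub : (PySem.Int.mod (((k:Int)+1) - m - 1) (m+1)).toNat = (k - mN) % (mN+1) := by
          rw [PySem.Int.mod_eq_emod_of_pos (by omega),
            show ((k:Int)+1) - m - 1 = ((k - mN : Nat) : Int) by omega, hm1]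
          rw [← Int.natCast_emod]
          exact Int.toNat_natCast _
        rw [hsub, hbuf (k - mN) (le_refl _) (by omega), hrs]
        have hlt : k - mN < (ctwB m k).length := by rw [ctwB_length]; omega
        have hdrop : (ctwB m k).drop (k - mN)
            = (ctwB m k).getD (k - mN) 0 :: (ctwB m k).drop (k+1-mN) := by
          rw [show k+1-mN = (k-mN)+1 by omega, List.getD_eq_getElem _ _ hlt,
            List.drop_eq_getElem_cons hlt]
        rw [hdrop]
        simp only [List.sum_cons]
        rw [PySem.Int.mod_eq_emod_of_pos (by omega), PySem.Int.mod_eq_emod_of_pos (by omega),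
          PySem.Int.mod_eq_emod_of_pos (by omega), ← ht]
        omega
      · rw [if_neg (by omega), hrs, show k - mN = k+1-mN by omega, ht]
    -- now unfold one step of A
    rw [ctwA_succ]
    simp only [ctwStepA, hrs_mid, hidx]
    have hwlen : (k+1) % (mN+1) < (ctwA m k).1.length := by
      rw [hlen]; exact Nat.mod_lt _ (by omega)
    have hget_set : ((ctwA m k).1.set ((k+1) % (mN+1)) (PySem.Int.mod t 20242024)).getD
        ((k+1) % (mN+1)) 0 = PySem.Int.mod t 20242024 := by
      rw [List.getD_eq_getElem _ _ (by simpa using hwlen)]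
      simp [List.getElem_set_self]
    refine ⟨by simpa using hlen, ?_, ?_⟩
    · -- running sum invariant
      rw [hget_set, hvB,
        List.drop_append_of_le_length (by rw [ctwB_length]; omega)]
      rw [List.sum_append, List.sum_cons, List.sum_nil]
      have hd : (k+1) - mN ≤ k + 1 - mN := le_refl _
      rw [show (ctwB m k).drop (k + 1 - mN) = (ctwB m k).drop (k+1-mN) from rfl, ← ht]
      rw [PySem.Int.mod_eq_emod_of_pos (by omega), PySem.Int.mod_eq_emod_of_pos (by omega),
        PySem.Int.mod_eq_emod_of_pos (by omega)]
      omega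
    · -- buffer invariant
      intro j hj1 hj2
      rcases Nat.lt_or_ge j (k+1) with hjk | hjk
      · -- old entry, untouched slot
        have hne : j % (mN+1) ≠ (k+1) % (mN+1) := by
          intro heq
          have hdvd : (mN+1) ∣ (k+1) - j := (Nat.modEq_iff_dvd' (by omega)).mp heq
          have := Nat.le_of_dvd (by omega) hdvd
          omega
        have hne' : (k+1) % (mN+1) ≠ j % (mN+1) := fun h => hne h.symm
        rw [List.getD, List.getElem?_set_ne hne', ← List.getD]
        rw [hbuf j (by omega) (by omega), hvB,
          List.getD_append _ _ 0 j (by rw [ctwB_length]; omega)]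
      · -- the freshly written entry j = k+1
        have hj : j = k+1 := by omega
        subst hj
        rw [hget_set, hvB]
        have : (ctwB m k).length = k+1 := ctwB_length m k
        rw [show k+1 = (ctwB m k).length from this.symm]
        simp [List.getD]

lemma ctw_main (n m : Int) (hm : 2 ≤ m) (hn : m < n) :
    count_transport_ways n m = count_transport_ways_alt n m := by
  have h1 : ¬ (n ≤ 0 ∨ m ≤ 0) := by omega
  have h2 : ¬ m ≥ n := by omega
  have h3 : ¬ m = 1 := by omega
  rw [count_transport_ways, count_transport_ways_alt,
    if_neg h1, if_neg h1, if_neg h2, if_neg h2, if_neg h3, if_neg h3]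
  set nN := n.toNat with hnN
  have hcast : n + 1 = ((nN:Int)) + 1 := by omega
  have hA : (PySem.List.pyRange 1 (n+1) 1).foldl (ctwStepA m)
      ((List.replicate (m+1).toNat 0).set 0 1, 1) = ctwA m nN := by
    rw [ctwA, hcast]
  have hB : (PySem.List.pyRange 1 (n+1) 1).foldl (ctwStepB m) [1] = ctwB m nN := by
    rw [ctwB, hcast]
  show ((PySem.List.pyRange 1 (n+1) 1).foldl (ctwStepA m)
      ((List.replicate (m+1).toNat 0).set 0 1, 1)).1.getD ((PySem.Int.mod n (m+1)).toNat) 0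
    = ((PySem.List.pyRange 1 (n+1) 1).foldl (ctwStepB m) [1]).getD n.toNat 0
  rw [hA, hB]
  have hidx : (PySem.Int.mod n (m+1)).toNat = nN % (m.toNat+1) := by
    rw [PySem.Int.mod_eq_emod_of_pos (by omega),
      show n = ((nN:Nat):Int) by omega, show m + 1 = ((m.toNat+1:Nat):Int) by omega]
    rw [← Int.natCast_emod]
    exact Int.toNat_natCast _
  rw [hidx, ← hnN]
  exact (ctw_inv m hm nN).2.2 nN (by omega) (le_refl _)

-- ===== VERDICT (by name: the statement is the Claim_ definition above) =====
theorem count_transport_ways_spec : Claim_equal_count_transport_ways := by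
  intro n m _
  unfold Spec_count_transport_ways
  by_cases h1 : n ≤ 0 ∨ m ≤ 0
  · rw [count_transport_ways, count_transport_ways_alt, if_pos h1, if_pos h1]
  by_cases h2 : m ≥ n
  · rw [count_transport_ways, count_transport_ways_alt, if_neg h1, if_neg h1, if_pos h2, if_pos h2]
  by_cases h3 : m = 1
  · rw [count_transport_ways, count_transport_ways_alt, if_neg h1, if_neg h1,
      if_neg h2, if_neg h2, if_pos h3, if_pos h3]
  exact ctw_main n m (by omega) (by omega)
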